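-- pv_equiv track=rewrite | github.com/tianocore/edk2 | BaseTools/Source/Python/Common/String.py | RemoveDupOption
-- ===== SOURCE A (Python) =====
-- def RemoveDupOption(OptionString, Which="/I", Against=None):
--     OptionList = OptionString.split()
--     ValueList = []
--     if Against:
--         ValueList += Against
--     for Index in range(len(OptionList)):
--         Opt = OptionList[Index]
--         if not Opt.startswith(Which):
--             continue
--         if len(Opt) > len(Which):
--             Val = Opt[len(Which):]
--         else:
--             Val = ""
--         if Val in ValueList:
--             OptionList[Index] = ""
--         else:
--             ValueList.append(Val)
--     return " ".join(OptionList)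
-- ===== SOURCE B (Python) =====
-- def RemoveDupOption(OptionString, Which="/I", Against=None):
--     tokens = OptionString.split()
--     against = set(Against) if Against else set()
--     keep = {}
--     for i, t in enumerate(tokens):
--         if t.startswith(Which):
--             v = t[len(Which):]
--             if v not in against and v not in keep:
--                 keep[v] = i
--     out = []
--     for i, t in enumerate(tokens):
--         if t.startswith(Which) and keep.get(t[len(Which):]) != i:
--             out.append("")
--         else:
--             out.append(t)
--     return " ".join(out)
-- ===== Notes on version B (the rewrite author's own statement) =====
-- stated objective: alternative
-- what changed: A makes one pass with a growing ValueList whose membership test decides blanking on the fly; B makes two passes: it first builds a set of Against values and a dict mapping each option value outside Against to the index of its first occurrence, then blanks every option token that is not its value's recorded first occurrence.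
import Mathlib
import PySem

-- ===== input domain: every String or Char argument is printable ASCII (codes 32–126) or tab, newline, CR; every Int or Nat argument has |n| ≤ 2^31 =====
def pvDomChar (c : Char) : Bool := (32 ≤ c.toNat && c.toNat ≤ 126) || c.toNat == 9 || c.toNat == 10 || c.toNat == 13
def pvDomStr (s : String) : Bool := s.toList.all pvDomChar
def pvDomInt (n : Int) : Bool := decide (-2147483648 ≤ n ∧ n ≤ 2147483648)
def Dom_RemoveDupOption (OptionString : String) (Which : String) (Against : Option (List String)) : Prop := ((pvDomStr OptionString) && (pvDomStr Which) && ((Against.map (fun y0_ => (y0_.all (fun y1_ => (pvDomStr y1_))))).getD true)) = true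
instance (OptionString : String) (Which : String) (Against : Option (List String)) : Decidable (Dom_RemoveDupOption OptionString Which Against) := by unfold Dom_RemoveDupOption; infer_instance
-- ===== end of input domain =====

-- ===== PORT A =====
-- B replaces A's running-ValueList membership pass by a two-pass scheme: build a
-- first-occurrence index table, then blank every option token that is not the
-- recorded first occurrence of its value (objective: alternative decomposition).
-- port of A: single left-to-right pass carrying the growing ValueList
def pvLoopA (Which : String) : List String → List String → List String
  | [], _ => []
  | Opt :: rest, ValueList =>
    if PySem.Str.startswith Opt Which then
      let Val : String :=
        if PySem.Str.len Opt > PySem.Str.len Which then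
          PySem.Str.slice Opt (some (PySem.Str.len Which)) none
        else ""
      if ValueList.contains Val then
        "" :: pvLoopA Which rest ValueList
      else
        Opt :: pvLoopA Which rest (ValueList ++ [Val])
    else
      Opt :: pvLoopA Which rest ValueList

def RemoveDupOption (OptionString : String) (Which : String) (Against : Option (List String)) : String :=
  let OptionList := PySem.Str.split₀ OptionString
  let ValueList : List String :=
    match Against with
    | some ag => if ag.isEmpty then [] else [] ++ ag    -- 'if Against: ValueList += Against'
    | none => []
  PySem.Str.join " " (pvLoopA Which OptionList ValueList)

-- ===== PORT B =====
-- v = t[len(Which):]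
def pvVal (Which t : String) : String := PySem.Str.slice t (some (PySem.Str.len Which)) none

-- first pass: keep[v] = index of first occurrence, skipping values in 'against'
def pvBuildKeep (Which : String) (against : PySem.Set String) : List String → Nat → PySem.Dict String Nat → PySem.Dict String Nat
  | [], _, keep => keep
  | t :: rest, i, keep =>
    pvBuildKeep Which against rest (i + 1)
      (if PySem.Str.startswith t Which
          && !(PySem.Set.contains against (pvVal Which t))
          && !(PySem.Dict.contains keep (pvVal Which t))
       then keep.insert (pvVal Which t) i
       else keep)

-- second pass: blank every option token that is not its value's recorded first occurrence
def pvScan (Which : String) (keep : PySem.Dict String Nat) : List String → Nat → List String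
  | [], _ => []
  | t :: rest, i =>
    (if PySem.Str.startswith t Which && (keep.get? (pvVal Which t) != some i)
     then "" else t) :: pvScan Which keep rest (i + 1)

def RemoveDupOption_alt (OptionString : String) (Which : String) (Against : Option (List String)) : String :=
  let tokens := PySem.Str.split₀ OptionString
  let against : PySem.Set String :=
    match Against with
    | some ag => if ag.isEmpty then PySem.Set.empty else PySem.Set.ofList ag   -- set(Against) if Against else set()
    | none => PySem.Set.empty
  let keep := pvBuildKeep Which against tokens 0 PySem.Dict.empty
  PySem.Str.join " " (pvScan Which keep tokens 0)

-- ===== PRECONDITION & SPEC =====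
def Spec_RemoveDupOption (OptionString : String) (Which : String) (Against : Option (List String)) (out : String) : Prop := out = RemoveDupOption_alt OptionString Which Against
instance (OptionString : String) (Which : String) (Against : Option (List String)) (out : String) : Decidable (Spec_RemoveDupOption OptionString Which Against out) := by unfold Spec_RemoveDupOption; infer_instance

-- ===== CLAIM (what is proved, stated in full; the proofs are below) =====
def Claim_equal_RemoveDupOption : Prop := ∀ (OptionString : String) (Which : String) (Against : Option (List String)), Dom_RemoveDupOption OptionString Which Against → Spec_RemoveDupOption OptionString Which Against (RemoveDupOption OptionString Which Against)

-- ===== LEMMAS AND PROOFS =====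

-- "token t is an option token whose value is v"
def pvP (Which v t : String) : Bool := PySem.Str.startswith t Which && (pvVal Which t == v)

lemma pvVal_toList (Which t : String) : (pvVal Which t).toList = t.toList.drop Which.toList.length := by
  simp [pvVal, pysem]

lemma pvValA_eq (Which t : String) (h : PySem.Str.startswith t Which = true) :
    (if PySem.Str.len t > PySem.Str.len Which then
        PySem.Str.slice t (some (PySem.Str.len Which)) none
      else "") = pvVal Which t := by
  split_ifs with hlt
  · rfl
  · apply String.toList_inj.mp
    rw [pvVal_toList]
    have hpre : Which.toList <+: t.toList := by
      simpa [PySem.Str.startswith_eq, PySem.Chars.startswith_iff] using h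
    have h1 := hpre.length_le
    have hlt' : ¬ ((Which.length : Int) < (t.length : Int)) := by simpa [pysem] using hlt
    have hle : t.toList.length ≤ Which.toList.length := by
      simp only [String.length_toList]; omega
    simp
    omega

lemma pvBuildKeep_get (Which : String) (against : PySem.Set String) :
    ∀ (ts : List String) (i : Nat) (keep : PySem.Dict String Nat) (v : String),
      (pvBuildKeep Which against ts i keep).get? v =
        if v ∈ against then keep.get? v
        else (keep.get? v).or ((List.findIdx? (pvP Which v) ts).map (i + ·)) := by
  intro ts
  induction ts with
  | nil => intro i keep v; simp [pvBuildKeep]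
  | cons t rest ih =>
    intro i keep v
    rw [pvBuildKeep, ih, List.findIdx?_cons]
    set v₀ := pvVal Which t with hv₀
    by_cases hag : v ∈ against
    · simp only [hag, if_true]
      split_ifs with hc
      · -- insert happened; inserted key v₀ ∉ against, so v₀ ≠ v
        simp only [Bool.and_eq_true, Bool.not_eq_true'] at hc
        have hne : v ≠ v₀ := by
          intro he
          have h2 := hc.1.2
          rw [← he, (PySem.Set.contains_iff against v).mpr hag] at h2
          cases h2
        rw [PySem.Dict.get?_insert]
        simp [hne]
      · rfl
    · simp only [hag, if_false]
      by_cases hp : pvP Which v t = true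
      · -- head matches: findIdx? gives 0
        have hp' := hp
        simp only [pvP, Bool.and_eq_true, beq_iff_eq] at hp
        have hsw : PySem.Str.startswith t Which = true := hp.1
        have hveq : v₀ = v := by rw [hv₀]; exact hp.2
        simp only [hp', if_true]
        cases hkv : keep.get? v with
        | some j =>
          -- v already present: no insert of v, Or short-circuits
          have hcont : PySem.Dict.contains keep v₀ = true := by
            rw [hveq, PySem.Dict.contains_eq_isSome_get?, hkv]; rfl
          simp only [hcont, Bool.not_true, Bool.and_false]
          simp [hkv]
        | none =>
          have hcont : PySem.Dict.contains keep v₀ = false := by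
            rw [hveq, PySem.Dict.contains_eq_isSome_get?, hkv]; rfl
          have hnag : PySem.Set.contains against v₀ = false := by
            rw [hveq]
            exact Bool.eq_false_iff.mpr (fun hx => hag ((PySem.Set.contains_iff against v).mp hx))
          simp only [hsw, hcont, hnag, Bool.not_false, Bool.and_true, if_true]
          rw [PySem.Dict.get?_insert]
          simp [hveq]
      · -- head does not match v
        have hkeep' : (if PySem.Str.startswith t Which
              && !(PySem.Set.contains against v₀)
              && !(PySem.Dict.contains keep v₀)
            then keep.insert v₀ i else keep).get? v = keep.get? v := by
          split_ifs with hc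
          · simp only [Bool.and_eq_true, Bool.not_eq_true'] at hc
            have hne : v ≠ v₀ := by
              intro he
              apply hp
              simp only [pvP, Bool.and_eq_true, beq_iff_eq]
              exact ⟨hc.1.1, by rw [← hv₀, ← he]⟩
            rw [PySem.Dict.get?_insert]; simp [hne]
          · rfl
        rw [hkeep']
        simp only [Bool.eq_false_iff.mpr hp]
        cases keep.get? v with
        | some j => simp
        | none =>
          simp only [Option.none_or]
          cases List.findIdx? (pvP Which v) rest with
          | none => rfl
          | some k => simp; omega

lemma pvLoop_eq (Which : String) (against : PySem.Set String) (keep : PySem.Dict String Nat) :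
    ∀ (ts : List String) (i : Nat) (vl : List String),
      (∀ v, v ∈ vl ↔ (v ∈ against ∨ ∃ j, keep.get? v = some j ∧ j < i)) →
      (∀ v, v ∉ against →
        ((∃ j, keep.get? v = some j ∧ j < i) ∨
          keep.get? v = (List.findIdx? (pvP Which v) ts).map (i + ·))) →
      (∀ v, v ∈ against → keep.get? v = none) →
      pvLoopA Which ts vl = pvScan Which keep ts i := by
  intro ts
  induction ts with
  | nil => intro i vl _ _ _; rfl
  | cons t rest ih =>
    intro i vl H Hk Hk2
    rw [pvLoopA, pvScan]
    -- the two hypotheses shifted to the tail, shared by all cases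
    have Hk' : ∀ v, v ∉ against →
        ((∃ j, keep.get? v = some j ∧ j < i + 1) ∨
          keep.get? v = (List.findIdx? (pvP Which v) rest).map ((i + 1) + ·)) := by
      intro v hv
      rcases Hk v hv with ⟨j, hj, hji⟩ | hr
      · exact Or.inl ⟨j, hj, by omega⟩
      · rw [List.findIdx?_cons] at hr
        cases hp : pvP Which v t with
        | true =>
          simp only [hp, if_true] at hr
          have hr' : keep.get? v = some i := by simpa using hr
          exact Or.inl ⟨i, hr', by omega⟩
        | false =>
          simp only [hp, Bool.false_eq_true, if_false] at hr
          refine Or.inr ?_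
          rw [hr]
          cases List.findIdx? (pvP Which v) rest with
          | none => rfl
          | some k => simp; omega
    -- get? v = some i forces t to be an option token with value v
    have Hi : ∀ v, keep.get? v = some i → pvP Which v t = true := by
      intro v hvi
      by_cases hv : v ∈ against
      · rw [Hk2 v hv] at hvi; cases hvi
      · rcases Hk v hv with ⟨j, hj, hji⟩ | hr
        · rw [hj] at hvi; injection hvi with h; omega
        · rw [List.findIdx?_cons] at hr
          by_cases hp : pvP Which v t = true
          · exact hp
          · exfalso
            simp only [Bool.eq_false_iff.mpr hp, Bool.false_eq_true, if_false] at hr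
            rw [hr] at hvi
            cases hfi : List.findIdx? (pvP Which v) rest with
            | none => rw [hfi] at hvi; cases hvi
            | some k => rw [hfi] at hvi; simp at hvi
    by_cases hsw : PySem.Str.startswith t Which = true
    · set v₀ := pvVal Which t with hv₀
      have hAval : (if PySem.Str.len t > PySem.Str.len Which then
          PySem.Str.slice t (some (PySem.Str.len Which)) none else "") = v₀ :=
        pvValA_eq Which t hsw
      have hp₀ : pvP Which v₀ t = true := by
        simp only [pvP, hv₀, beq_self_eq_true, Bool.and_true]
        exact hsw
      have hdec : vl.contains v₀ = true ↔ keep.get? v₀ ≠ some i := by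
        constructor
        · intro hc
          rcases (H v₀).mp (by simpa using hc) with hag | ⟨j, hj, hji⟩
          · rw [Hk2 v₀ hag]; simp
          · rw [hj]; intro he; injection he with h; omega
        · intro hne
          apply List.contains_iff_mem.mpr
          apply (H v₀).mpr
          by_cases hag : v₀ ∈ against
          · exact Or.inl hag
          · rcases Hk v₀ hag with hl | hr
            · exact Or.inr hl
            · exfalso
              rw [List.findIdx?_cons, hp₀, if_pos rfl] at hr
              exact hne (by simpa using hr)
      simp only [hsw, hAval, if_true]
      by_cases hc : vl.contains v₀ = true
      · -- duplicate / against: both blank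
        have hbne : (keep.get? v₀ != some i) = true := bne_iff_ne.mpr (hdec.mp hc)
        rw [if_pos hc]
        simp only [hbne, Bool.and_true, if_true]
        congr 1
        apply ih (i + 1) vl _ Hk' Hk2
        intro v
        rw [H v]
        constructor
        · rintro (hag | ⟨j, hj, hji⟩)
          · exact Or.inl hag
          · exact Or.inr ⟨j, hj, by omega⟩
        · rintro (hag | ⟨j, hj, hji⟩)
          · exact Or.inl hag
          · by_cases hji' : j < i
            · exact Or.inr ⟨j, hj, hji'⟩
            · -- j = i: then pvP v t, so v = v₀ ∈ vl = contradiction with... v ∈ vl needed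
              have hji'' : j = i := by omega
              have hpv := Hi v (by rw [← hji'']; exact hj)
              have hveq : v = v₀ := by
                simp only [pvP, Bool.and_eq_true, beq_iff_eq] at hpv
                rw [← hpv.2, hv₀]
              rw [hveq]
              exact (H v₀).mp (List.contains_iff_mem.mp hc)
      · -- first occurrence not in Against: both keep the token
        have hsome : keep.get? v₀ = some i := by
          by_contra hne
          exact hc (hdec.mpr hne)
        have hbne : (keep.get? v₀ != some i) = false := by simp [hsome]
        rw [if_neg hc]
        simp only [hbne, Bool.and_false, Bool.false_eq_true, if_false]
        congr 1
        apply ih (i + 1) (vl ++ [v₀]) _ Hk' Hk2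
        intro v
        rw [List.mem_append]
        constructor
        · rintro (hvl | hv1)
          · rcases (H v).mp hvl with hag | ⟨j, hj, hji⟩
            · exact Or.inl hag
            · exact Or.inr ⟨j, hj, by omega⟩
          · have hveq : v = v₀ := by simpa using hv1
            exact Or.inr ⟨i, by rw [hveq]; exact hsome, by omega⟩
        · rintro (hag | ⟨j, hj, hji⟩)
          · exact Or.inl ((H v).mpr (Or.inl hag))
          · by_cases hji' : j < i
            · exact Or.inl ((H v).mpr (Or.inr ⟨j, hj, hji'⟩))
            · have hji'' : j = i := by omega
              have hpv := Hi v (by rw [← hji'']; exact hj)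
              have hveq : v = v₀ := by
                simp only [pvP, Bool.and_eq_true, beq_iff_eq] at hpv
                rw [← hpv.2, hv₀]
              exact Or.inr (by simp [hveq])
    · -- non-option token: both keep it unchanged
      rw [Bool.eq_false_iff.mpr hsw]
      simp only [Bool.false_and, Bool.false_eq_true, if_false]
      congr 1
      apply ih (i + 1) vl _ Hk' Hk2
      intro v
      rw [H v]
      constructor
      · rintro (hag | ⟨j, hj, hji⟩)
        · exact Or.inl hag
        · exact Or.inr ⟨j, hj, by omega⟩
      · rintro (hag | ⟨j, hj, hji⟩)
        · exact Or.inl hag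
        · by_cases hji' : j < i
          · exact Or.inr ⟨j, hj, hji'⟩
          · exfalso
            have hji'' : j = i := by omega
            have hpv := Hi v (by rw [← hji'']; exact hj)
            simp only [pvP, Bool.and_eq_true] at hpv
            exact hsw hpv.1

lemma pvInit_mem (Against : Option (List String)) (v : String) :
    (v ∈ (match Against with
            | some ag => if ag.isEmpty then [] else [] ++ ag
            | none => ([] : List String))) ↔
    v ∈ (match Against with
          | some ag => if ag.isEmpty then PySem.Set.empty else PySem.Set.ofList ag
          | none => PySem.Set.empty) := by
  cases Against with
  | none => simp [PySem.Set.empty]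
  | some ag =>
    by_cases h : ag.isEmpty
    · simp [h, PySem.Set.empty]
    · simp [h, PySem.Set.mem_ofList]

lemma pvMain (Which : String) (tokens : List String) (Against : Option (List String)) :
    pvLoopA Which tokens
      (match Against with
        | some ag => if ag.isEmpty then [] else [] ++ ag
        | none => ([] : List String)) =
    pvScan Which
      (pvBuildKeep Which
        (match Against with
          | some ag => if ag.isEmpty then PySem.Set.empty else PySem.Set.ofList ag
          | none => PySem.Set.empty)
        tokens 0 PySem.Dict.empty)
      tokens 0 := by
  apply pvLoop_eq (against :=
    match Against with
    | some ag => if ag.isEmpty then PySem.Set.empty else PySem.Set.ofList ag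
    | none => PySem.Set.empty)
  · intro v
    rw [pvInit_mem Against v]
    constructor
    · exact fun h => Or.inl h
    · rintro (h | ⟨j, _, hj⟩)
      · exact h
      · omega
  · intro v hv
    refine Or.inr ?_
    rw [pvBuildKeep_get, if_neg hv]
    simp [PySem.Dict.get?_empty]
  · intro v hv
    rw [pvBuildKeep_get, if_pos hv]
    simp [PySem.Dict.get?_empty]

-- ===== VERDICT (by name: the statement is the Claim_ definition above) =====
theorem RemoveDupOption_spec : Claim_equal_RemoveDupOption := by
  intro OptionString Which Against _
  exact congrArg (PySem.Str.join " ") (pvMain Which (PySem.Str.split₀ OptionString) Against)
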